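-- pv_equiv track=rewrite | github.com/ikibalin/cryspy | cryspy/A_functions_base/function_1_strings.py | ciftext_to_html
-- ===== SOURCE A (Python) =====
-- def ciftext_to_html(text: str) -> str:
--     """Convert cif text to html format."""
--     l_text_new = []
--     for line in text.split("\n"):
--         if line.strip().startswith("###"):
--             line_new = f"<h3>{line:}</h3>"
--         elif line.strip().startswith("##"):
--             line_new = f"<h2>{line:}</h2>"
--         elif line.strip().startswith("#"):
--             line_new = f"<h1>{line:}</h1>"
--         else:
--             line_new = line
--         l_text_new.append(line_new)
--     text_html = "<br>".join(l_text_new)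
--     # text_html = "<b>"+text.replace("\n", "<br>")+"<\b>"
--     return text_html
-- ===== SOURCE B (Python) =====
-- def ciftext_to_html(text: str) -> str:
--     """Convert cif text to html format."""
--     html = ""
--     rest = text
--     while True:
--         line, sep, rest = rest.partition("\n")
--         s = line.strip()
--         level = min(len(s) - len(s.lstrip("#")), 3)
--         if level:
--             tag = f"h{level}"
--             html += f"<{tag}>{line}</{tag}>"
--         else:
--             html += line
--         if not sep:
--             return html
--         html += "<br>"
-- ===== Notes on version B (the rewrite author's own statement) =====
-- stated objective: alternative
-- what changed: Replaces A's pipeline (split the text into a list of lines, map an ordered prefix-test chain over it, then join with the separator) by a single streaming while-loop that partitions one line off the front at a time, classifies it arithmetically as the capped count of leading hash characters of the stripped line, and concatenates the wrapped line and separator directly onto the output string, with no intermediate list and no join.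
import Mathlib
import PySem

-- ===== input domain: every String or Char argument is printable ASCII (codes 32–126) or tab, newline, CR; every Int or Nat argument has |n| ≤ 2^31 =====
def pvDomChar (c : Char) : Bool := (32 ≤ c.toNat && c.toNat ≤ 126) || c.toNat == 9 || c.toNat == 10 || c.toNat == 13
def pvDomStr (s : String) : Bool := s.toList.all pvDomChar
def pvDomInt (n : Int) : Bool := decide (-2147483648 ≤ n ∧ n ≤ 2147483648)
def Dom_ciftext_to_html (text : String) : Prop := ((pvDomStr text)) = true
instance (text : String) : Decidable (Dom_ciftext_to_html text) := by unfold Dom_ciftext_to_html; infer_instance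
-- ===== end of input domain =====

-- B replaces A's split/map-over-a-list/join pipeline (with its ordered startswith chain per line)
-- by a single streaming loop: partition off one line at a time, classify it arithmetically by the
-- length drop of lstrip('#'), and append directly to the output string (simpler decomposition).

-- ===== PORT A =====
-- per-line body of A's for-loop: the if/elif chain on line.strip().startswith(…)
def pvLineA (line : List Char) : List Char :=
  if PySem.Chars.startswith (PySem.Chars.strip line) "###".toList then
    "<h3>".toList ++ line ++ "</h3>".toList
  else if PySem.Chars.startswith (PySem.Chars.strip line) "##".toList then
    "<h2>".toList ++ line ++ "</h2>".toList
  else if PySem.Chars.startswith (PySem.Chars.strip line) "#".toList then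
    "<h1>".toList ++ line ++ "</h1>".toList
  else line

def ciftext_to_html (text : String) : String :=
  String.ofList (PySem.Chars.join "<br>".toList
    ((PySem.Chars.splitOn text.toList "\n".toList).map pvLineA))

-- ===== PORT B =====
-- per-line body of B's loop: level = min(len(s) - len(s.lstrip('#')), 3), tag = f"h{level}".
-- s.lstrip("#") is hand-ported as dropWhile (· == '#'): exact, the strip set is the single char '#'.
def pvWrapB (line : List Char) : List Char :=
  let s := PySem.Chars.strip line
  let level := min (s.length - (s.dropWhile (fun c => c == '#')).length) 3
  if level ≠ 0 then
    let tag := "h".toList ++ (PySem.Int.toStr (level : Int)).toList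
    "<".toList ++ tag ++ ">".toList ++ line ++ "</".toList ++ tag ++ ">".toList
  else line

-- the while-True loop: rest.partition("\n") ported via the index of the first '\n' (none = no sep)
def pvAltLoop (rest : List Char) (html : List Char) : List Char :=
  match h : rest.idxOf? '\n' with
  | none => html ++ pvWrapB rest
  | some i =>
      pvAltLoop (rest.drop (i + 1)) (html ++ pvWrapB (rest.take i) ++ "<br>".toList)
termination_by rest.length
decreasing_by
  obtain ⟨hi, -, -⟩ := List.idxOf?_eq_some_iff.mp h
  simp only [List.length_drop]; omega

def ciftext_to_html_alt (text : String) : String :=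
  String.ofList (pvAltLoop text.toList [])

-- ===== PRECONDITION & SPEC =====
def Spec_ciftext_to_html (text : String) (out : String) : Prop := out = ciftext_to_html_alt text
instance (text : String) (out : String) : Decidable (Spec_ciftext_to_html text out) := by unfold Spec_ciftext_to_html; infer_instance

-- ===== CLAIM (what is proved, stated in full; the proofs are below) =====
def Claim_equal_ciftext_to_html : Prop := ∀ (text : String), Dom_ciftext_to_html text → Spec_ciftext_to_html text (ciftext_to_html text)

-- ===== LEMMAS AND PROOFS =====

-- startswith a run of k '#' iff at least k leading '#' (measured as the takeWhile run's length)
theorem startswith_replicate_hash_iff (s : List Char) (k : Nat) :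
    PySem.Chars.startswith s (List.replicate k '#') = true ↔
      k ≤ (s.takeWhile (fun c => c == '#')).length := by
  induction k generalizing s with
  | zero => simp [PySem.Chars.startswith_iff]
  | succ k ih =>
    cases s with
    | nil => simp [PySem.Chars.startswith_iff, List.replicate_succ]
    | cons c t =>
      rw [PySem.Chars.startswith_iff, List.replicate_succ, List.cons_prefix_cons,
        ← PySem.Chars.startswith_iff, ih]
      by_cases hc : c = '#'
      · simp [hc]
      · simp [hc]
        intro h; exact absurd h.symm hc

-- the two per-line bodies agree
theorem wrap_eq (l : List Char) : pvWrapB l = pvLineA l := by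
  have hlen : (PySem.Chars.strip l).length -
      (List.dropWhile (fun c => c == '#') (PySem.Chars.strip l)).length =
      (List.takeWhile (fun c => c == '#') (PySem.Chars.strip l)).length := by
    have h := congrArg List.length (List.takeWhile_append_dropWhile (p := fun c => c == '#')
      (l := PySem.Chars.strip l))
    rw [List.length_append] at h
    omega
  simp only [pvWrapB, pvLineA, hlen]
  have h3 := startswith_replicate_hash_iff (PySem.Chars.strip l) 3
  have h2 := startswith_replicate_hash_iff (PySem.Chars.strip l) 2
  have h1 := startswith_replicate_hash_iff (PySem.Chars.strip l) 1
  have t3 : PySem.Int.toChars (3 : Int) = ['3'] := rfl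
  have t2 : PySem.Int.toChars (2 : Int) = ['2'] := rfl
  have t1 : PySem.Int.toChars (1 : Int) = ['1'] := rfl
  set m := (List.takeWhile (fun c => c == '#') (PySem.Chars.strip l)).length with hm
  by_cases c3 : 3 ≤ m
  · have s3 : PySem.Chars.startswith (PySem.Chars.strip l) ['#', '#', '#'] = true := h3.mpr c3
    have : min m 3 = 3 := by omega
    simp [s3, this, t3]
  · have s3 : ¬ (PySem.Chars.startswith (PySem.Chars.strip l) ['#', '#', '#'] = true) :=
      fun h => c3 (h3.mp h)
    by_cases c2 : 2 ≤ m
    · have s2 : PySem.Chars.startswith (PySem.Chars.strip l) ['#', '#'] = true := h2.mpr c2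
      have : min m 3 = 2 := by omega
      simp [s3, s2, this, t2]
    · have s2 : ¬ (PySem.Chars.startswith (PySem.Chars.strip l) ['#', '#'] = true) :=
        fun h => c2 (h2.mp h)
      by_cases c1 : 1 ≤ m
      · have s1 : PySem.Chars.startswith (PySem.Chars.strip l) ['#'] = true := h1.mpr c1
        have : min m 3 = 1 := by omega
        simp [s3, s2, s1, this, t1]
      · have s1 : ¬ (PySem.Chars.startswith (PySem.Chars.strip l) ['#'] = true) :=
          fun h => c1 (h1.mp h)
        have : min m 3 = 0 := by omega
        simp [s3, s2, s1, this]

-- splitOn.go: the accumulator is a reversed prefix of the result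
theorem go_acc (sep : List Char) (fuel : Nat) :
    ∀ (l cur : List Char) (acc : List (List Char)),
      PySem.Chars.splitOn.go sep fuel l cur acc =
        acc.reverse ++ PySem.Chars.splitOn.go sep fuel l cur [] := by
  induction fuel with
  | zero => intro l cur acc; simp [PySem.Chars.splitOn.go]
  | succ fuel ih =>
    intro l cur acc
    cases l with
    | nil => simp [PySem.Chars.splitOn.go]
    | cons c rest =>
      rw [PySem.Chars.splitOn.go, PySem.Chars.splitOn.go]
      split
      · rw [ih _ [] (cur.reverse :: acc), ih _ [] [cur.reverse]]
        simp
      · exact ih _ _ acc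

-- consuming a newline-free prefix just moves it (reversed) into cur
theorem go_skip (a : List Char) (ha : '\n' ∉ a) :
    ∀ (fuel : Nat) (rest cur : List Char) (acc : List (List Char)),
      a.length ≤ fuel →
      PySem.Chars.splitOn.go ['\n'] fuel (a ++ rest) cur acc =
        PySem.Chars.splitOn.go ['\n'] (fuel - a.length) rest (a.reverse ++ cur) acc := by
  induction a with
  | nil => intro fuel rest cur acc _; simp
  | cons c a ih =>
    intro fuel rest cur acc h
    cases fuel with
    | zero => simp at h
    | succ fuel =>
      have hc : c ≠ '\n' := fun hc => ha (by simp [hc])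
      rw [List.cons_append, PySem.Chars.splitOn.go]
      have hpre : ¬ (['\n'].isPrefixOf (c :: (a ++ rest)) = true) := by
        simp [List.isPrefixOf]; exact fun hc' => hc hc'.symm
      rw [if_neg hpre]
      rw [ih (fun h' => ha (by simp [h'])) fuel rest (c :: cur) acc (by simp at h; omega)]
      simp only [List.length_cons, List.reverse_cons, Nat.succ_sub_succ]
      rw [List.append_assoc]
      simp

-- splitOn on a newline-free string
theorem splitOn_no_nl (a : List Char) (ha : '\n' ∉ a) :
    PySem.Chars.splitOn a ['\n'] = [a] := by
  unfold PySem.Chars.splitOn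
  rw [show a = a ++ [] by simp]
  rw [go_skip a ha _ [] [] [] (by simp)]
  have : (a ++ []).length + 1 - a.length = 1 := by simp
  rw [this]
  simp [PySem.Chars.splitOn.go]

-- splitOn across the first newline
theorem splitOn_cons_nl (a b : List Char) (ha : '\n' ∉ a) :
    PySem.Chars.splitOn (a ++ '\n' :: b) ['\n'] = a :: PySem.Chars.splitOn b ['\n'] := by
  unfold PySem.Chars.splitOn
  rw [go_skip a ha _ _ [] [] (by simp; omega)]
  have h1 : (a ++ '\n' :: b).length + 1 - a.length = b.length + 2 := by simp; omega
  rw [h1, PySem.Chars.splitOn.go]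
  rw [if_pos (by simp [List.isPrefixOf])]
  simp only [List.length_cons, List.length_nil, List.append_nil, List.reverse_reverse,
    List.drop_succ_cons, List.drop_zero]
  rw [go_acc]
  simp only [List.reverse_cons, List.reverse_nil, List.nil_append, List.cons_append,
    List.nil_append]

-- splitOn never returns the empty list
theorem splitOn_ne_nil (b : List Char) : PySem.Chars.splitOn b ['\n'] ≠ [] := by
  cases hidx : b.idxOf? '\n' with
  | none =>
    rw [splitOn_no_nl b (List.idxOf?_eq_none_iff.mp hidx)]; simp
  | some i =>
    obtain ⟨hi, hget, hlt⟩ := List.idxOf?_eq_some_iff.mp hidx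
    have hdecomp : b = b.take i ++ '\n' :: b.drop (i + 1) := by
      rw [← hget, ← List.drop_eq_getElem_cons hi]; simp
    have hta : '\n' ∉ b.take i := by
      intro hmem
      obtain ⟨j, hj, hjget⟩ := List.getElem_of_mem hmem
      have hj' : j < i := by simp at hj; omega
      exact hlt j hj' (by rw [← hjget, List.getElem_take])
    rw [hdecomp, splitOn_cons_nl _ _ hta]; simp

-- the streaming loop computes A's map-join, with the accumulator in front
theorem altLoop_eq (n : Nat) : ∀ (cs : List Char), cs.length ≤ n → ∀ (html : List Char),
    pvAltLoop cs html =
      html ++ PySem.Chars.join "<br>".toList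
        ((PySem.Chars.splitOn cs ['\n']).map pvLineA) := by
  induction n with
  | zero =>
    intro cs h html
    have : cs = [] := List.eq_nil_of_length_eq_zero (by omega)
    subst this
    rw [pvAltLoop]
    simp [splitOn_no_nl [] (by simp), PySem.Chars.join_singleton, wrap_eq]
  | succ n ih =>
    intro cs h html
    rw [pvAltLoop]
    split
    · rename_i hidx
      have hnl : '\n' ∉ cs := List.idxOf?_eq_none_iff.mp hidx
      rw [splitOn_no_nl cs hnl]
      simp [PySem.Chars.join_singleton, wrap_eq]
    · rename_i i hidx
      obtain ⟨hi, hget, hlt⟩ := List.idxOf?_eq_some_iff.mp hidx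
      have hdecomp : cs = cs.take i ++ '\n' :: cs.drop (i + 1) := by
        rw [← hget, ← List.drop_eq_getElem_cons hi]; simp
      have hta : '\n' ∉ cs.take i := by
        intro hmem
        obtain ⟨j, hj, hjget⟩ := List.getElem_of_mem hmem
        have hj' : j < i := by simp at hj; omega
        exact hlt j hj' (by rw [← hjget, List.getElem_take])
      rw [ih _ (by simp; omega)]
      conv_rhs => rw [hdecomp]
      rw [splitOn_cons_nl _ _ hta]
      obtain ⟨x, xs, hx⟩ := List.exists_cons_of_ne_nil (splitOn_ne_nil (cs.drop (i + 1)))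
      rw [hx]
      simp only [List.map_cons]
      rw [PySem.Chars.join_cons_cons]
      simp [wrap_eq]

-- ===== VERDICT (by name: the statement is the Claim_ definition above) =====
theorem ciftext_to_html_spec : Claim_equal_ciftext_to_html := by
  intro text _
  unfold Spec_ciftext_to_html ciftext_to_html ciftext_to_html_alt
  rw [altLoop_eq text.toList.length text.toList le_rfl []]
  simp
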